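-- pv_equiv track=rewrite | github.com/matsusht24/battleground_overlay | server/hero_selection.py | get_best_hero
-- ===== SOURCE A (Python) =====
-- def get_best_hero(hero_list, hero_options):
--
--
--     # Define the tier ranking
--     tier_ranking = {
--         'S': 5,
--         'A': 4,
--         'B': 3,
--         'C': 2,
--         'D': 1,
--         'F': 0
--     }
--     best_hero = ''
--     highTier = 0
--     best_heroes = []
--     for hero in hero_options:
--         tmpTier =  tier_ranking[hero_list[hero]]
--         if tmpTier == highTier:
--             best_heroes.append(hero)
--         if tmpTier > highTier:
--             highTier = tmpTier
--             best_heroes = [hero]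
--
--     best_hero = '/'.join(best_heroes)
--     return best_hero
-- ===== SOURCE B (Python) =====
-- def get_best_hero(hero_list, hero_options):
--     # Two-pass: compute the highest tier first, then keep exactly the heroes at it.
--     tier_ranking = {
--         'S': 5,
--         'A': 4,
--         'B': 3,
--         'C': 2,
--         'D': 1,
--         'F': 0
--     }
--     if not hero_options:
--         return ''
--     top = max(tier_ranking[hero_list[h]] for h in hero_options)
--     return '/'.join(h for h in hero_options if tier_ranking[hero_list[h]] == top)
-- ===== Notes on version B (the rewrite author's own statement) =====
-- stated objective: simpler
-- what changed: Replaces the single running-best loop with mutable (highTier, best_heroes) state by a two-pass max-then-filter: compute the top tier with max(), then join the heroes whose tier equals it.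
import Mathlib
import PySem

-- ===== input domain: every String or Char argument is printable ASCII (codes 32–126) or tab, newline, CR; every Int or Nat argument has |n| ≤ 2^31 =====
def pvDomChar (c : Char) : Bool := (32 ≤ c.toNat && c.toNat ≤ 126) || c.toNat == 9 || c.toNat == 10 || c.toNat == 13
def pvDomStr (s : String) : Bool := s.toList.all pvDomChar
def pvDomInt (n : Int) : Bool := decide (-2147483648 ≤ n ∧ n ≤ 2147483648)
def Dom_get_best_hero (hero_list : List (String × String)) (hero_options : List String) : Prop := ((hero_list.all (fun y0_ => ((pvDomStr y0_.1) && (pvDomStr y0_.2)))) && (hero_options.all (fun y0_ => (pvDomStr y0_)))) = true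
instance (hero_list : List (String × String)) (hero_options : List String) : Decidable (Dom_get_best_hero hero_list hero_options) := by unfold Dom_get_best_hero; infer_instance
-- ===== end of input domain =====

-- B replaces A's single running-best loop by a max-then-filter two-pass (objective: simpler).

-- shared helpers: the tier_ranking dict and the two dict lookups tier_ranking[hero_list[hero]]
def pvTierRanking : PySem.Dict String Int :=
  PySem.Dict.mk [("S", 5), ("A", 4), ("B", 3), ("C", 2), ("D", 1), ("F", 0)]

-- hero_list[hero] (first match, Pre_ guarantees it exists); then tier_ranking[...] (Pre_ guarantees the tier is valid)
def pvTier (hero_list : List (String × String)) (hero : String) : Int :=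
  PySem.Dict.getD pvTierRanking (((hero_list.find? (fun p => p.1 == hero)).map (·.2)).getD "") 0

-- ===== PORT A =====
-- loop body of A: append on tie, reset on a strictly higher tier
def pvStepA (t : String → Int) (st : Int × List String) (hero : String) : Int × List String :=
  let tmpTier := t hero
  let st1 := if tmpTier == st.1 then (st.1, st.2 ++ [hero]) else st
  if st1.1 < tmpTier then (tmpTier, [hero]) else st1

def get_best_hero (hero_list : List (String × String)) (hero_options : List String) : String :=
  PySem.Str.join "/" (hero_options.foldl (pvStepA (pvTier hero_list)) (0, [])).2

-- ===== PORT B =====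
def get_best_hero_alt (hero_list : List (String × String)) (hero_options : List String) : String :=
  if hero_options = [] then ""
  else
    let top := ((PySem.List.max? (hero_options.map (pvTier hero_list)) (fun y => y)).getD 0)
    PySem.Str.join "/" (hero_options.filter (fun h => pvTier hero_list h == top))

-- ===== PRECONDITION & SPEC =====
-- Pre_ excludes exactly the inputs where Python A raises KeyError: some option is not a key of
-- hero_list, or its tier string is not one of S/A/B/C/D/F.
def Pre_get_best_hero (hero_list : List (String × String)) (hero_options : List String) : Prop :=
  ∀ h ∈ hero_options,
    (((hero_list.find? (fun p => p.1 == h)).map (·.2)).getD "") ∈ (["S", "A", "B", "C", "D", "F"] : List String)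
instance (hero_list : List (String × String)) (hero_options : List String) : Decidable (Pre_get_best_hero hero_list hero_options) := by unfold Pre_get_best_hero; infer_instance

def pvWitness_get_best_hero : (List (String × String)) × List String :=
  ([("ana", "S"), ("bob", "A"), ("cid", "S")], ["ana", "bob", "cid"])

def Spec_get_best_hero (hero_list : List (String × String)) (hero_options : List String) (out : String) : Prop := out = get_best_hero_alt hero_list hero_options
instance (hero_list : List (String × String)) (hero_options : List String) (out : String) : Decidable (Spec_get_best_hero hero_list hero_options out) := by unfold Spec_get_best_hero; infer_instance

-- ===== CLAIM (what is proved, stated in full; the proofs are below) =====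
def Claim_equal_get_best_hero : Prop := ∀ (hero_list : List (String × String)) (hero_options : List String), Dom_get_best_hero hero_list hero_options → Pre_get_best_hero hero_list hero_options → Spec_get_best_hero hero_list hero_options (get_best_hero hero_list hero_options)

-- ===== LEMMAS AND PROOFS =====

-- under Pre_, the looked-up tier is one of S/A/B/C/D/F, so its ranking is nonnegative
lemma pvTier_nonneg_of_pre (hero_list : List (String × String)) (h : String)
    (hp : (((hero_list.find? (fun p => p.1 == h)).map (·.2)).getD "") ∈
      (["S", "A", "B", "C", "D", "F"] : List String)) :
    0 ≤ pvTier hero_list h := by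
  unfold pvTier
  simp only [List.mem_cons, List.not_mem_nil, or_false] at hp
  rcases hp with h1 | h1 | h1 | h1 | h1 | h1 <;> rw [h1] <;> decide

-- characterisation of A's fold: first component is the running max, second the heroes at it
lemma foldA_eq (t : String → Int) (l : List String) : ∀ (m : Int) (bh : List String),
    l.foldl (pvStepA t) (m, bh) =
      (List.foldl max m (l.map t),
       (if m = List.foldl max m (l.map t) then bh else []) ++
         l.filter (fun h => t h == List.foldl max m (l.map t))) := by
  induction l with
  | nil => intro m bh; simp
  | cons x l ih =>
    intro m bh
    simp only [List.map_cons, List.foldl_cons, List.filter_cons]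
    rcases lt_trichotomy (t x) m with hlt | heq | hgt
    · have hstep : pvStepA t (m, bh) x = (m, bh) := by
        unfold pvStepA
        simp [show ¬ (t x = m) from ne_of_lt hlt, not_lt.2 (le_of_lt hlt)]
      have hM : m ≤ List.foldl max m (l.map t) := (PySem.List.le_foldl_max _ _).1
      have hne : ¬ t x = List.foldl max m (l.map t) := by omega
      rw [hstep, ih m bh]
      simp [max_eq_left (le_of_lt hlt), hne]
    · have hstep : pvStepA t (m, bh) x = (m, bh ++ [x]) := by
        unfold pvStepA; simp [heq]
      rw [hstep, ih m (bh ++ [x])]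
      simp only [heq, max_self]
      by_cases hMm : m = List.foldl max m (l.map t)
      · simp [← hMm]
      · simp [hMm]
    · have hstep : pvStepA t (m, bh) x = (t x, [x]) := by
        unfold pvStepA
        simp [show ¬ (t x = m) from ne_of_gt hgt, hgt]
      rw [hstep, ih (t x) [x]]
      simp only [max_eq_right (le_of_lt hgt)]
      have hM : t x ≤ List.foldl max (t x) (l.map t) := (PySem.List.le_foldl_max _ _).1
      have hmne : ¬ m = List.foldl max (t x) (l.map t) := by omega
      by_cases hx : t x = List.foldl max (t x) (l.map t)
      · simp [← hx, ne_of_lt hgt]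
      · simp [hx, hmne]

-- ===== VERDICT (by name: the statement is the Claim_ definition above) =====
theorem get_best_hero_spec : Claim_equal_get_best_hero := by
  intro hero_list hero_options _ hpre
  unfold Spec_get_best_hero get_best_hero get_best_hero_alt
  cases hero_options with
  | nil =>
    simp only [List.foldl_nil, if_true]
    decide
  | cons o rest =>
    rw [foldA_eq (pvTier hero_list) (o :: rest) 0 []]
    have hmax : (PySem.List.max? ((o :: rest).map (pvTier hero_list)) (fun y => y)).getD 0
        = List.foldl max 0 ((o :: rest).map (pvTier hero_list)) := by
      rw [List.map_cons, PySem.List.max?_id_cons, List.foldl_cons,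
          max_eq_right (pvTier_nonneg_of_pre hero_list o (hpre o (by simp)))]
      rfl
    simp only [reduceCtorEq, if_false, hmax]
    have hz : (if (0 : Int) = List.foldl max 0 ((o :: rest).map (pvTier hero_list))
        then ([] : List String) else []) = [] := by split_ifs <;> rfl
    rw [hz, List.nil_append]
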